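-- pv_equiv track=rewrite | github.com/ALIYILD/DeepSynaps-Protocol-Studio | apps/api/app/services/qeeg_ai_interpreter.py | _modalities_for_conditions
-- ===== SOURCE A (Python) =====
-- MODALITY_MAP: dict[str, list[str]] = {
--     "adhd": ["neurofeedback", "tdcs", "eeg_training"],
--     "depression": ["tms", "tdcs", "neurofeedback"],
--     "anxiety": ["neurofeedback", "breathwork", "taVNS"],
--     "ptsd": ["neurofeedback", "eye_movement", "taVNS"],
--     "ocd": ["tms", "neurofeedback", "tdcs"],
--     "insomnia": ["neurofeedback", "cranial_estim", "breathwork"],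
--     "autism": ["neurofeedback", "tdcs", "taVNS"],
--     "mild_cognitive_impairment": ["tdcs", "tms", "neurofeedback"],
--     "mci": ["tdcs", "tms", "neurofeedback"],
--     "alzheimers": ["tdcs", "tms", "photobiomodulation"],
--     "dementia": ["tdcs", "tms", "photobiomodulation"],
--     "stroke": ["tdcs", "tms", "neurofeedback"],
--     "traumatic_brain_injury": ["photobiomodulation", "neurofeedback", "tdcs"],
--     "tbi": ["photobiomodulation", "neurofeedback", "tdcs"],
--     "chronic_pain": ["tdcs", "tms", "neurofeedback"],
--     "fibromyalgia": ["tdcs", "tms", "neurofeedback"],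
--     "migraine": ["taVNS", "tdcs", "neurofeedback"],
--     "epilepsy": ["neurofeedback", "vns", "responsive_stimulation"],
--     "addiction": ["tms", "neurofeedback", "tdcs"],
--     "substance_use": ["tms", "neurofeedback", "tdcs"],
--     "schizophrenia": ["tms", "tdcs", "neurofeedback"],
--     "bipolar": ["tms", "tdcs", "neurofeedback"],
--     "tinnitus": ["tms", "tdcs", "neurofeedback"],
--     "burnout": ["neurofeedback", "breathwork", "hrv_biofeedback"],
--     "sleep_apnea": ["cpap", "neurofeedback", "breathwork"],
-- }
--
-- _DEFAULT_MODALITIES: list[str] = ["neurofeedback", "tdcs", "tms"]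
--
-- def _modalities_for_conditions(flagged: list[str]) -> list[str]:
--     """Pick the top-3 unique modalities implied by the flagged conditions."""
--     seen: list[str] = []
--     for cond in flagged or []:
--         key = str(cond).strip().lower()
--         for mod in MODALITY_MAP.get(key, []):
--             if mod not in seen:
--                 seen.append(mod)
--         if len(seen) >= 3:
--             break
--     if not seen:
--         seen = list(_DEFAULT_MODALITIES)
--     return seen[:3]
-- ===== SOURCE B (Python) =====
-- # Modality name constants (single source of truth for the spellings).
-- NF = "neurofeedback"
-- TDCS = "tdcs"
-- TMS = "tms"
-- TAVNS = "taVNS"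
-- BREATH = "breathwork"
-- PBM = "photobiomodulation"
--
-- _DEFAULT_MODALITIES: list[str] = [NF, TDCS, TMS]
--
-- # Conditions grouped by their shared recommendation triple (inverted table:
-- # each row is (condition keys, the 3 modalities they all map to)).
-- _GROUPS: list[tuple[tuple[str, ...], list[str]]] = [
--     (("adhd",), [NF, TDCS, "eeg_training"]),
--     (("depression", "schizophrenia", "bipolar", "tinnitus"), [TMS, TDCS, NF]),
--     (("anxiety",), [NF, BREATH, TAVNS]),
--     (("ptsd",), [NF, "eye_movement", TAVNS]),
--     (("ocd", "addiction", "substance_use"), [TMS, NF, TDCS]),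
--     (("insomnia",), [NF, "cranial_estim", BREATH]),
--     (("autism",), [NF, TDCS, TAVNS]),
--     (("mild_cognitive_impairment", "mci", "stroke", "chronic_pain",
--       "fibromyalgia"), [TDCS, TMS, NF]),
--     (("alzheimers", "dementia"), [TDCS, TMS, PBM]),
--     (("traumatic_brain_injury", "tbi"), [PBM, NF, TDCS]),
--     (("migraine",), [TAVNS, TDCS, NF]),
--     (("epilepsy",), [NF, "vns", "responsive_stimulation"]),
--     (("burnout",), [NF, BREATH, "hrv_biofeedback"]),
--     (("sleep_apnea",), ["cpap", NF, BREATH]),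
-- ]
--
--
-- def _modalities_for_conditions(flagged: list[str]) -> list[str]:
--     # Each group holds exactly the 3 distinct modalities of its conditions, so
--     # the answer is the triple of the first flagged condition found in a group.
--     for cond in flagged or []:
--         key = str(cond).strip().lower()
--         for keys, mods in _GROUPS:
--             if key in keys:
--                 return mods[:3]
--     return list(_DEFAULT_MODALITIES)
-- ===== Notes on version B (the rewrite author's own statement) =====
-- stated objective: alternative
-- what changed: B replaces A's dict lookup plus running 'seen' list with inner dedup loop and post-loop truncation by an inverted grouped table (condition keys grouped by their shared modality triple, since every MODALITY_MAP value is 3 distinct modalities) and returns the first matching group's triple directly, maintaining no accumulator at all.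
import Mathlib
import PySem

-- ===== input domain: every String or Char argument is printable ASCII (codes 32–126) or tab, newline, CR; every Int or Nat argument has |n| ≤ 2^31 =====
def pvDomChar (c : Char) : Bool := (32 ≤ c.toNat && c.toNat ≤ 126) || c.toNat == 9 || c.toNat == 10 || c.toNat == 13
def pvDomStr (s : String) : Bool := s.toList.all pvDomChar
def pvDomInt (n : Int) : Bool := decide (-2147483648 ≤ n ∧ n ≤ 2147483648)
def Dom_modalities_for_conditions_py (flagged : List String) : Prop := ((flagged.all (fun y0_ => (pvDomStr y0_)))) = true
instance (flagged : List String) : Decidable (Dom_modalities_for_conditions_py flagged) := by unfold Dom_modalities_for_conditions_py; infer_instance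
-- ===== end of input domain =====

-- B replaces A's dict + running 'seen' dedup accumulator by an inverted grouped table
-- (condition keys grouped by their shared modality triple) and returns the first
-- matching group's triple directly: simpler, no accumulator, same results.

-- ===== PORT A =====
def modalityMap : PySem.Dict String (List String) := PySem.Dict.mk [
  ("adhd", ["neurofeedback", "tdcs", "eeg_training"]),
  ("depression", ["tms", "tdcs", "neurofeedback"]),
  ("anxiety", ["neurofeedback", "breathwork", "taVNS"]),
  ("ptsd", ["neurofeedback", "eye_movement", "taVNS"]),
  ("ocd", ["tms", "neurofeedback", "tdcs"]),
  ("insomnia", ["neurofeedback", "cranial_estim", "breathwork"]),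
  ("autism", ["neurofeedback", "tdcs", "taVNS"]),
  ("mild_cognitive_impairment", ["tdcs", "tms", "neurofeedback"]),
  ("mci", ["tdcs", "tms", "neurofeedback"]),
  ("alzheimers", ["tdcs", "tms", "photobiomodulation"]),
  ("dementia", ["tdcs", "tms", "photobiomodulation"]),
  ("stroke", ["tdcs", "tms", "neurofeedback"]),
  ("traumatic_brain_injury", ["photobiomodulation", "neurofeedback", "tdcs"]),
  ("tbi", ["photobiomodulation", "neurofeedback", "tdcs"]),
  ("chronic_pain", ["tdcs", "tms", "neurofeedback"]),
  ("fibromyalgia", ["tdcs", "tms", "neurofeedback"]),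
  ("migraine", ["taVNS", "tdcs", "neurofeedback"]),
  ("epilepsy", ["neurofeedback", "vns", "responsive_stimulation"]),
  ("addiction", ["tms", "neurofeedback", "tdcs"]),
  ("substance_use", ["tms", "neurofeedback", "tdcs"]),
  ("schizophrenia", ["tms", "tdcs", "neurofeedback"]),
  ("bipolar", ["tms", "tdcs", "neurofeedback"]),
  ("tinnitus", ["tms", "tdcs", "neurofeedback"]),
  ("burnout", ["neurofeedback", "breathwork", "hrv_biofeedback"]),
  ("sleep_apnea", ["cpap", "neurofeedback", "breathwork"])]

def defaultModalities : List String := ["neurofeedback", "tdcs", "tms"]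

-- the outer `for cond in flagged` loop with its `seen` accumulator and `break`
def aLoop : List String → List String → List String
  | seen, [] => seen
  | seen, cond :: rest =>
    let key := PySem.Str.lower (PySem.Str.strip cond)
    -- inner loop: for mod in MODALITY_MAP.get(key, []): if mod not in seen: seen.append(mod)
    let seen' := (modalityMap.getD key []).foldl
      (fun s m => if s.contains m then s else s ++ [m]) seen
    if 3 ≤ seen'.length then seen' else aLoop seen' rest

def modalities_for_conditions_py (flagged : List String) : List String :=
  let seen := aLoop [] flagged
  let seen := if seen = [] then defaultModalities else seen
  PySem.List.slice seen none (some 3)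

-- ===== PORT B =====
-- modality name constants (NF/TDCS/… in Source B)
def bNF : String := "neurofeedback"
def bTDCS : String := "tdcs"
def bTMS : String := "tms"
def bTAVNS : String := "taVNS"
def bBREATH : String := "breathwork"
def bPBM : String := "photobiomodulation"

def bDefaults : List String := [bNF, bTDCS, bTMS]

-- _GROUPS: conditions grouped by their shared recommendation triple
def bGroups : List (List String × List String) := [
  (["adhd"], [bNF, bTDCS, "eeg_training"]),
  (["depression", "schizophrenia", "bipolar", "tinnitus"], [bTMS, bTDCS, bNF]),
  (["anxiety"], [bNF, bBREATH, bTAVNS]),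
  (["ptsd"], [bNF, "eye_movement", bTAVNS]),
  (["ocd", "addiction", "substance_use"], [bTMS, bNF, bTDCS]),
  (["insomnia"], [bNF, "cranial_estim", bBREATH]),
  (["autism"], [bNF, bTDCS, bTAVNS]),
  (["mild_cognitive_impairment", "mci", "stroke", "chronic_pain", "fibromyalgia"], [bTDCS, bTMS, bNF]),
  (["alzheimers", "dementia"], [bTDCS, bTMS, bPBM]),
  (["traumatic_brain_injury", "tbi"], [bPBM, bNF, bTDCS]),
  (["migraine"], [bTAVNS, bTDCS, bNF]),
  (["epilepsy"], [bNF, "vns", "responsive_stimulation"]),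
  (["burnout"], [bNF, bBREATH, "hrv_biofeedback"]),
  (["sleep_apnea"], ["cpap", bNF, bBREATH])]

-- the inner `for keys, mods in _GROUPS: if key in keys: return mods[:3]`
def bFind (key : String) : Option (List String) :=
  bGroups.findSome? (fun g =>
    if g.1.contains key then some (PySem.List.slice g.2 none (some 3)) else none)

def modalities_for_conditions_py_alt : List String → List String
  | [] => bDefaults
  | cond :: rest =>
    let key := PySem.Str.lower (PySem.Str.strip cond)
    match bFind key with
    | some mods => mods
    | none => modalities_for_conditions_py_alt rest

-- ===== PRECONDITION & SPEC =====
def Spec_modalities_for_conditions_py (flagged : List String) (out : List String) : Prop := out = modalities_for_conditions_py_alt flagged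
instance (flagged : List String) (out : List String) : Decidable (Spec_modalities_for_conditions_py flagged out) := by unfold Spec_modalities_for_conditions_py; infer_instance

-- ===== CLAIM (what is proved, stated in full; the proofs are below) =====
def Claim_equal_modalities_for_conditions_py : Prop := ∀ (flagged : List String), Dom_modalities_for_conditions_py flagged → Spec_modalities_for_conditions_py flagged (modalities_for_conditions_py flagged)

-- ===== LEMMAS AND PROOFS =====

-- a successful lookup in a literal Dict names one of its entries, with the key equal
theorem get?_mk_some {ν : Type} (ps : List (String × ν)) (k : String) (v : ν)
    (h : (PySem.Dict.mk ps).get? k = some v) : ∃ p ∈ ps, p.1 = k ∧ p.2 = v := by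
  induction ps with
  | nil => simp [PySem.Dict.get?] at h
  | cons p rest ih =>
    rw [show (p :: rest) = ((p.1, p.2) :: rest) from rfl, PySem.Dict.get?_mk_cons] at h
    by_cases hk : (p.1 == k) = true
    · simp at hk
      simp [hk] at h
      exact ⟨p, List.mem_cons_self, hk, h⟩
    · simp [hk] at h
      obtain ⟨q, hq, h1, h2⟩ := ih h
      exact ⟨q, List.mem_cons_of_mem _ hq, h1, h2⟩

-- on every key the dict maps, B's group scan finds exactly the dict's triple,
-- A's dedup fold from empty 'seen' rebuilds it, and it has length 3
theorem per_key_facts (key : String) (L : List String)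
    (h : modalityMap.get? key = some L) :
    bFind key = some L ∧
    L.foldl (fun s m => if s.contains m then s else s ++ [m]) [] = L ∧ L.length = 3 := by
  have hall : ∀ p ∈ modalityMap.items,
      bFind p.1 = some p.2 ∧
      p.2.foldl (fun s m => if s.contains m then s else s ++ [m]) [] = p.2 ∧
      p.2.length = 3 := by decide
  obtain ⟨p, hp, h1, h2⟩ := get?_mk_some _ key L h
  have := hall p hp
  rw [h1, h2] at this
  exact this

-- on a key the dict does not map, B's group scan finds nothing either
theorem bFind_none (key : String) (h : modalityMap.get? key = none) :
    bFind key = none := by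
  cases hb : bFind key with
  | none => rfl
  | some r =>
    exfalso
    obtain ⟨g, hg, hf⟩ := List.exists_of_findSome?_eq_some hb
    have hmem : key ∈ g.1 := by
      by_cases hc : g.1.contains key = true
      · simpa using hc
      · rw [if_neg hc] at hf; cases hf
    have hall : ∀ k ∈ bGroups.flatMap Prod.fst, (modalityMap.get? k).isSome := by decide
    have := hall key (List.mem_flatMap.mpr ⟨g, hg, hmem⟩)
    rw [h] at this
    simp at this

theorem main_eq (flagged : List String) :
    modalities_for_conditions_py flagged = modalities_for_conditions_py_alt flagged := by
  induction flagged with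
  | nil => decide
  | cons cond rest ih =>
    unfold modalities_for_conditions_py modalities_for_conditions_py_alt aLoop
    cases h : modalityMap.get? (PySem.Str.lower (PySem.Str.strip cond)) with
    | none =>
      simp only [PySem.Dict.getD_eq_get?_getD, h, Option.getD_none, List.foldl_nil,
        List.length_nil, bFind_none _ h]
      norm_num
      exact ih
    | some L =>
      obtain ⟨hb, hfold, hlen⟩ := per_key_facts _ L h
      simp only [PySem.Dict.getD_eq_get?_getD, h, Option.getD_some, hfold, hlen, hb]
      norm_num
      have hne : L ≠ [] := by intro hnil; rw [hnil] at hlen; simp at hlen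
      have hsl : PySem.List.slice L none (some 3) = L := by
        rw [show (3:Int) = ((3:Nat):Int) from rfl, PySem.List.slice_to_natCast]
        exact List.take_of_length_le (by omega)
      simp [hne, hsl]

-- ===== VERDICT (by name: the statement is the Claim_ definition above) =====
theorem modalities_for_conditions_py_spec : Claim_equal_modalities_for_conditions_py := by
  intro flagged _
  exact main_eq flagged
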